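-- pv_equiv track=rewrite | github.com/pypi-data/pypi-mirror-385 | packages/reflexive/reflexive-2.2.2.tar.gz/reflexive-2.2.2/.history/src/reflexive/analysis_functions_20251021145809.py | zero_mod
-- ===== SOURCE A (Python) =====
-- def zero_mod(am):
--     nm = []
--     for r,row in enumerate(am):
--         nr = []
--         for c,weight in enumerate(row):
--             if r >= 3 or c >= 3:
--                 nr.append(weight)
--             else:
--                 nr.append(0)
--         nm.append(nr)
--     return nm
-- ===== SOURCE B (Python) =====
-- def zero_mod(am):
--     nm = [list(row) for row in am]
--     for r in range(min(3, len(nm))):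
--         row = nm[r]
--         for c in range(min(3, len(row))):
--             row[c] = 0
--     return nm
-- ===== Notes on version B (the rewrite author's own statement) =====
-- stated objective: simpler
-- what changed: B copies the whole matrix unconditionally and then overwrites only the (at most 3x3) top-left corner with bounded loops, instead of A's per-element branch over every cell.
import Mathlib
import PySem

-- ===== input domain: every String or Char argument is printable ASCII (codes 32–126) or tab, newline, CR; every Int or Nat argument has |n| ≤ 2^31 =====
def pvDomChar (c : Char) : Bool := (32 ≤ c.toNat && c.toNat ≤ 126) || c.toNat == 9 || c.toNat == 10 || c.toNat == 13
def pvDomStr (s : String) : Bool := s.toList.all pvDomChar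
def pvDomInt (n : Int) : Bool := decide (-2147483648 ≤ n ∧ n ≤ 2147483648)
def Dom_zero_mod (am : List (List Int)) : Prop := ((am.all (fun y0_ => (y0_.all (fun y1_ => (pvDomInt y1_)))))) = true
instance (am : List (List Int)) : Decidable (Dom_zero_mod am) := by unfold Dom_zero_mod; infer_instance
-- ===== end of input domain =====

-- B zeroes the top-left (at most 3x3) corner by an unconditional whole-matrix copy followed by
-- a bounded corner overwrite, instead of A's per-element branch over every cell (objective: simpler).

-- ===== PORT A =====
-- for r,row in enumerate(am): for c,weight in enumerate(row): append weight or 0; append the row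
def zero_mod (am : List (List Int)) : List (List Int) :=
  (PySem.List.enumerate am 0).foldl
    (fun nm p =>
      nm ++ [(PySem.List.enumerate p.2 0).foldl
        (fun nr q => if 3 ≤ p.1 ∨ 3 ≤ q.1 then nr ++ [q.2] else nr ++ [(0 : Int)]) []])
    []

-- ===== PORT B =====
-- nm = [list(row) for row in am]  (list(row) copies; on pure Lean lists the copy is the identity)
-- then: for r in range(min(3,len(nm))): row = nm[r]; for c in range(min(3,len(row))): row[c] = 0
def zero_mod_alt (am : List (List Int)) : List (List Int) :=
  let nm := am.map (fun row => row)
  (List.range (min 3 nm.length)).foldl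
    (fun nm r =>
      let row := nm.getD r []
      nm.set r ((List.range (min 3 row.length)).foldl (fun row c => row.set c 0) row))
    nm

-- ===== PRECONDITION & SPEC =====
def Spec_zero_mod (am : List (List Int)) (out : List (List Int)) : Prop := out = zero_mod_alt am
instance (am : List (List Int)) (out : List (List Int)) : Decidable (Spec_zero_mod am out) := by unfold Spec_zero_mod; infer_instance

-- ===== CLAIM (what is proved, stated in full; the proofs are below) =====
def Claim_equal_zero_mod : Prop := ∀ (am : List (List Int)), Dom_zero_mod am → Spec_zero_mod am (zero_mod am)

-- ===== LEMMAS AND PROOFS =====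

-- inner loop of B: zero out the first n entries of a row
def zmF (n : Nat) (row : List Int) : List Int :=
  (List.range n).foldl (fun row c => row.set c 0) row

-- outer loop of B
def zmG (n : Nat) (nm : List (List Int)) : List (List Int) :=
  (List.range n).foldl
    (fun nm r =>
      let row := nm.getD r []
      nm.set r ((List.range (min 3 row.length)).foldl (fun row c => row.set c 0) row))
    nm

lemma zero_mod_alt_eq (am : List (List Int)) :
    zero_mod_alt am = zmG (min 3 am.length) am := by
  simp [zero_mod_alt, zmG, List.map_id']

lemma zmF_step (n : Nat) (row : List Int) : zmF (n+1) row = (zmF n row).set n 0 := by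
  simp [zmF, List.range_succ]

lemma zmF_length (n : Nat) (row : List Int) : (zmF n row).length = row.length := by
  induction n with
  | zero => simp [zmF]
  | succ n ih => rw [zmF_step, List.length_set, ih]

lemma zmF_get? (n : Nat) (row : List Int) (c : Nat) :
    (zmF n row)[c]? = row[c]?.map (fun w => if c < n then 0 else w) := by
  induction n with
  | zero => cases h : row[c]? <;> simp [zmF, h]
  | succ n ih =>
    rw [zmF_step, List.getElem?_set, zmF_length, ih]
    by_cases h : n = c
    · subst h
      by_cases hcl : n < row.length
      · simp [hcl]
      · rw [List.getElem?_eq_none (by omega)]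
        simp [hcl]
    · have e : (c < n + 1) ↔ (c < n) := by omega
      cases hh : row[c]? <;> simp [h, e]

lemma zmG_step (n : Nat) (nm : List (List Int)) :
    zmG (n+1) nm =
      (zmG n nm).set n (zmF (min 3 ((zmG n nm).getD n []).length) ((zmG n nm).getD n [])) := by
  simp [zmG, zmF, List.range_succ]

lemma zmG_length (n : Nat) (nm : List (List Int)) : (zmG n nm).length = nm.length := by
  induction n with
  | zero => simp [zmG]
  | succ n ih => rw [zmG_step, List.length_set, ih]

lemma zmG_get? (n : Nat) (nm : List (List Int)) (hn : n ≤ nm.length) :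
    ∀ r : Nat, (zmG n nm)[r]? =
      nm[r]?.map (fun row => if r < n then zmF (min 3 row.length) row else row) := by
  induction n with
  | zero => intro r; cases h : nm[r]? <;> simp [zmG, h]
  | succ n ih =>
    intro r
    have hn' : n ≤ nm.length := by omega
    have hnlt : n < nm.length := hn
    have hgetDn : (zmG n nm).getD n [] = nm[n] := by
      rw [List.getD_eq_getElem?_getD, ih hn' n, List.getElem?_eq_getElem hnlt]
      simp
    rw [zmG_step, hgetDn, List.getElem?_set, zmG_length, ih hn' r]
    by_cases h : n = r
    · subst h
      simp [hnlt]
    · have e : (r < n + 1) ↔ (r < n) := by omega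
      cases hh : nm[r]? <;> simp [h, e]

-- A as a nested map with indices
lemma zero_mod_eq_map (am : List (List Int)) :
    zero_mod am = (PySem.List.enumerate am 0).map
      (fun p => (PySem.List.enumerate p.2 0).map
        (fun q => if 3 ≤ p.1 ∨ 3 ≤ q.1 then q.2 else 0)) := by
  unfold zero_mod
  rw [show (fun (nm : List (List Int)) (p : Int × List Int) =>
      nm ++ [(PySem.List.enumerate p.2 0).foldl
        (fun nr q => if 3 ≤ p.1 ∨ 3 ≤ q.1 then nr ++ [q.2] else nr ++ [(0:Int)]) []]) =
    (fun nm p => nm ++ [(PySem.List.enumerate p.2 0).map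
        (fun q => if 3 ≤ p.1 ∨ 3 ≤ q.1 then q.2 else 0)]) from by
      funext nm p
      congr 1
      rw [show (fun (nr : List Int) (q : Int × Int) =>
          if 3 ≤ p.1 ∨ 3 ≤ q.1 then nr ++ [q.2] else nr ++ [(0:Int)]) =
        (fun nr q => nr ++ [if 3 ≤ p.1 ∨ 3 ≤ q.1 then q.2 else (0:Int)]) from by
          funext nr q; split_ifs <;> rfl]
      rw [PySem.List.foldl_append_singleton_eq_map]
      simp]
  rw [PySem.List.foldl_append_singleton_eq_map]
  simp

-- ===== VERDICT (by name: the statement is the Claim_ definition above) =====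
theorem zero_mod_spec : Claim_equal_zero_mod := by
  intro am _
  unfold Spec_zero_mod
  rw [zero_mod_eq_map, zero_mod_alt_eq]
  apply List.ext_getElem?
  intro r
  rw [List.getElem?_map, PySem.List.getElem?_enumerate,
      zmG_get? _ _ (Nat.min_le_right _ _) r]
  cases h : am[r]? with
  | none => simp
  | some row =>
    have hr : r < am.length := by
      by_contra hc
      rw [List.getElem?_eq_none (by omega)] at h
      simp at h
    simp only [Option.map_some]
    congr 1
    by_cases hr3 : r < 3
    · rw [if_pos (by omega)]
      apply List.ext_getElem?
      intro c
      rw [List.getElem?_map, PySem.List.getElem?_enumerate, zmF_get?]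
      cases hc : row[c]? with
      | none => simp
      | some w =>
        have hcl : c < row.length := by
          by_contra hcc
          rw [List.getElem?_eq_none (by omega)] at hc
          simp at hc
        simp only [Option.map_some]
        congr 1
        by_cases hc3 : c < 3
        · simp only [show c < min 3 row.length from by omega, if_pos]
          simp
          omega
        · simp only [show ¬ c < min 3 row.length from by omega, if_neg, not_false_iff]
          simp
          omega
    · rw [if_neg (by omega)]
      apply List.ext_getElem?
      intro c
      rw [List.getElem?_map, PySem.List.getElem?_enumerate]
      cases hc : row[c]? with
      | none => simp
      | some w =>
        simp
        omega
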